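-- pv_equiv track=rewrite | github.com/goulu/Goulib | Goulib/math2.py | coprimes_gen
-- ===== SOURCE A (Python) =====
-- def coprimes_gen(limit):
--     '''generates coprime pairs
--     using Farey sequence
--     '''
--     # https://www.quora.com/What-are-the-fastest-algorithms-for-generating-coprime-pairs
--
--     pend = []
--     n,d = 0,1 # n, d is the start fraction n/d (0,1) initially
--     N = D = 1 # N, D is the stop fraction N/D (1,1) initially
--     while True:
--         mediant_d = d + D
--         if mediant_d <= limit:
--             mediant_n = n + N
--             pend.append((mediant_n, mediant_d, N, D))
--             N = mediant_n
--             D = mediant_d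
--         else:
--             yield n, d #numerator / denominator
--             if pend:
--                 n, d, N, D = pend.pop()
--             else:
--                 break
-- ===== SOURCE B (Python) =====
-- def coprimes_gen(limit):
--     '''generates coprime pairs
--     using Farey sequence
--     '''
--     # Farey next-term recurrence: O(1) state, no stack.
--     yield 0, 1
--     if limit < 2:
--         return
--     a, b, c, d = 0, 1, 1, limit
--     while (c, d) != (1, 1):
--         yield c, d
--         k = (limit + b) // d
--         a, b, c, d = c, d, k * c - a, k * d - b
-- ===== Notes on version B (the rewrite author's own statement) =====
-- stated objective: alternative
-- what changed: Replaces the explicit pending-stack traversal of the Stern-Brocot tree by the classic Farey next-term recurrence (k = (limit+b)//d; next = (k*c-a, k*d-b)), keeping only O(1) state instead of an O(limit) stack.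
import Mathlib
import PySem

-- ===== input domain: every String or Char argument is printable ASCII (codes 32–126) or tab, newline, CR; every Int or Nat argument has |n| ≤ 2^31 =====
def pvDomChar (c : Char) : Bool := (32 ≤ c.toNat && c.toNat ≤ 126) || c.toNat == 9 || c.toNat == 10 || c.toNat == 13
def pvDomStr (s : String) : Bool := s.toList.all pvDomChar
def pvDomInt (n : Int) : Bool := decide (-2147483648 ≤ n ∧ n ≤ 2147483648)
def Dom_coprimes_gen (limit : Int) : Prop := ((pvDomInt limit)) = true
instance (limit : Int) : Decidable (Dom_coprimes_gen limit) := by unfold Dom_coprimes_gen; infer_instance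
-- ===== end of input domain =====

-- B replaces A's explicit stack over the Stern–Brocot tree by the classic Farey
-- next-term recurrence (O(1) state, no stack); same exact output list.

-- ===== PORT A =====
-- A's `while True` with the explicit `pend` stack, transcribed; `fuel` is a
-- totality guard only (the fuel passed below is proved sufficient: see the
-- final theorem, which applies `loopA_go` whose fuel bound is discharged there).
def loopA (limit : Int) (fuel : Nat) (n d N D : Int) (pend : List (Int × Int × Int × Int)) : List (Int × Int) :=
  match fuel with
  | 0 => []
  | fuel + 1 =>
    if d + D ≤ limit then
      loopA limit fuel n d (n + N) (d + D) ((n + N, d + D, N, D) :: pend)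
    else
      (n, d) :: (match pend with
        | [] => []
        | (n', d', N', D') :: rest => loopA limit fuel n' d' N' D' rest)

def coprimes_gen (limit : Int) : List (Int × Int) :=
  loopA limit (2 * 3 ^ (limit + 1).toNat + 1) 0 1 1 1 []

-- ===== PORT B =====
-- B's while-loop over (a,b,c,d); `fuel` is a totality guard only (the fuel passed
-- below is proved sufficient, see fareyLoop-related lemmas).
def fareyLoop (limit : Int) (fuel : Nat) (a b c d : Int) : List (Int × Int) :=
  match fuel with
  | 0 => []
  | fuel + 1 =>
    if c = 1 ∧ d = 1 then []
    else (c, d) :: fareyLoop limit fuel c d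
      (PySem.Int.floordiv (limit + b) d * c - a)
      (PySem.Int.floordiv (limit + b) d * d - b)

def coprimes_gen_alt (limit : Int) : List (Int × Int) :=
  (0, 1) :: (if limit < 2 then [] else fareyLoop limit (3 ^ (limit + 1).toNat + 1) 0 1 1 limit)

-- ===== PRECONDITION & SPEC =====
def Spec_coprimes_gen (limit : Int) (out : List (Int × Int)) : Prop := out = coprimes_gen_alt limit
instance (limit : Int) (out : List (Int × Int)) : Decidable (Spec_coprimes_gen limit out) := by unfold Spec_coprimes_gen; infer_instance

-- ===== CLAIM (what is proved, stated in full; the proofs are below) =====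
def Claim_equal_coprimes_gen : Prop := ∀ (limit : Int), Dom_coprimes_gen limit → Spec_coprimes_gen limit (coprimes_gen limit)

-- ===== LEMMAS AND PROOFS =====

-- weight: bound on remaining work of a traversal state (fuel-sufficiency bookkeeping)
def pvW (limit d D : Int) : Nat := 3 ^ (limit + 1 - (d + D)).toNat - 1

theorem pvW_push (limit d D : Int) (hd : 1 ≤ d) (hD : 1 ≤ D) (h : d + D ≤ limit) :
    pvW limit d (d + D) + pvW limit (d + D) D < pvW limit d D := by
  unfold pvW
  have hk0 : 1 ≤ (limit + 1 - (d + D)).toNat := by omega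
  have h1 : (limit + 1 - (d + (d + D))).toNat ≤ (limit + 1 - (d + D)).toNat - 1 := by omega
  have h2 : (limit + 1 - ((d + D) + D)).toNat ≤ (limit + 1 - (d + D)).toNat - 1 := by omega
  have p1 : 3 ^ (limit + 1 - (d + (d + D))).toNat ≤ 3 ^ ((limit + 1 - (d + D)).toNat - 1) :=
    Nat.pow_le_pow_right (by norm_num) h1
  have p2 : 3 ^ (limit + 1 - ((d + D) + D)).toNat ≤ 3 ^ ((limit + 1 - (d + D)).toNat - 1) :=
    Nat.pow_le_pow_right (by norm_num) h2
  have e : 3 ^ (limit + 1 - (d + D)).toNat = 3 * 3 ^ ((limit + 1 - (d + D)).toNat - 1) := by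
    conv_lhs => rw [show (limit + 1 - (d + D)).toNat = ((limit + 1 - (d + D)).toNat - 1) + 1 by omega]
    rw [pow_succ]; ring
  have hp : 1 ≤ 3 ^ ((limit + 1 - (d + D)).toNat - 1) := Nat.one_le_pow _ _ (by norm_num)
  omega

theorem pvW_zero (limit d D : Int) (h : ¬ d + D ≤ limit) : pvW limit d D = 0 := by
  unfold pvW
  have : (limit + 1 - (d + D)).toNat = 0 := by omega
  simp [this]


theorem go_dec1 (limit d D : Int) (h1 : d + D ≤ limit) (h2 : 1 ≤ d ∧ 1 ≤ D) :
    (limit + 1 - (d + (d + D))).toNat < (limit + 1 - (d + D)).toNat := by omega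

theorem go_dec2 (limit d D : Int) (h1 : d + D ≤ limit) (h2 : 1 ≤ d ∧ 1 ≤ D) :
    (limit + 1 - (d + D + D)).toNat < (limit + 1 - (d + D)).toNat := by omega

-- Proof-side recursive view of A's stack traversal (Stern–Brocot subtree).
def go (limit n d N D : Int) : List (Int × Int) :=
  if h1 : d + D ≤ limit then
    if h2 : 1 ≤ d ∧ 1 ≤ D then
      go limit n d (n + N) (d + D) ++ go limit (n + N) (d + D) N D
    else []
  else [(n, d)]
termination_by (limit + 1 - (d + D)).toNat
decreasing_by
  · exact go_dec1 limit d D h1 h2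
  · exact go_dec2 limit d D h1 h2

-- relation between consecutive emitted fractions: Farey neighbours of order `limit`
def pvRel (limit : Int) (x y : Int × Int) : Prop :=
  x.2 * y.1 - x.1 * y.2 = 1 ∧ limit < x.2 + y.2

theorem loopA_go (limit : Int) : ∀ (fuel : Nat) (n d N D : Int) (pend : List (Int × Int × Int × Int)),
    1 ≤ d → 1 ≤ D → (∀ f ∈ pend, 1 ≤ f.2.1 ∧ 1 ≤ f.2.2.2) →
    2 * (pvW limit d D + (pend.map (fun f => pvW limit f.2.1 f.2.2.2)).sum) + pend.length < fuel →
    loopA limit fuel n d N D pend =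
      go limit n d N D ++ (pend.map (fun f => go limit f.1 f.2.1 f.2.2.1 f.2.2.2)).flatten := by
  intro fuel
  induction fuel with
  | zero => intro n d N D pend _ _ _ hb; omega
  | succ fuel ih =>
    intro n d N D pend hd hD hp hb
    by_cases h1 : d + D ≤ limit
    · simp only [loopA]
      rw [if_pos h1, go, dif_pos h1, dif_pos ⟨hd, hD⟩]
      rw [ih n d (n + N) (d + D) ((n + N, d + D, N, D) :: pend) hd (by omega)
        (by
          intro f hf
          rcases List.mem_cons.mp hf with h | h
          · subst h; exact ⟨by simp; omega, by simpa using hD⟩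
          · exact hp f h)
        (by
          have := pvW_push limit d D hd hD h1
          simp only [List.map_cons, List.sum_cons, List.length_cons] at hb ⊢
          omega)]
      simp [List.append_assoc]
    · simp only [loopA]
      rw [if_neg h1, go, dif_neg h1]
      rcases pend with _ | ⟨⟨n', d', N', D'⟩, rest⟩
      · simp
      · show ((n, d) :: loopA limit fuel n' d' N' D' rest) = _
        rw [ih n' d' N' D' rest (hp _ (List.mem_cons_self)).1 (hp _ (List.mem_cons_self)).2
          (fun f hf => hp f (List.mem_cons_of_mem _ hf))
          (by
            have := pvW_zero limit d D h1
            simp only [List.map_cons, List.sum_cons, List.length_cons] at hb ⊢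
            omega)]
        simp

theorem go_spec (limit : Int) : ∀ n d N D : Int,
    1 ≤ d → d ≤ limit → 1 ≤ D → D ≤ limit → 0 ≤ n → 0 ≤ N → d * N - n * D = 1 →
    (∃ t, go limit n d N D = (n, d) :: t) ∧
    List.IsChain (pvRel limit) (go limit n d N D ++ [(N, D)]) ∧
    ∀ p ∈ go limit n d N D, 1 ≤ p.2 ∧ p.2 ≤ limit ∧ 0 ≤ p.1 ∧ p.1 * D < p.2 * N := by
  intro n d N D
  fun_induction go limit n d N D with
  | case2 n d N D h1 h2 =>
    intro hd _ hD _ _ _ _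
    exact absurd ⟨hd, hD⟩ h2
  | case3 n d N D h1 =>
    intro hd hdl hD hDl hn hN hu
    refine ⟨⟨[], rfl⟩, ?_, ?_⟩
    · rw [show ([(n, d)] ++ [(N, D)] : List (Int × Int)) = [(n, d), (N, D)] from rfl,
        List.isChain_pair]
      exact ⟨hu, by omega⟩
    · intro p hp
      simp only [List.mem_singleton] at hp
      subst hp
      exact ⟨hd, hdl, hn, by simp; linarith⟩
  | case1 n d N D h1 h2 ih1 ih2 =>
    intro hd hdl hD hDl hn hN hu
    have hu1 : d * (n + N) - n * (d + D) = 1 := by linear_combination hu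
    have hu2 : (d + D) * N - (n + N) * D = 1 := by linear_combination hu
    obtain ⟨⟨t1, hL⟩, hC1, hB1⟩ := ih1 hd hdl (by omega) h1 hn (by omega) hu1
    obtain ⟨⟨t2, hR⟩, hC2, hB2⟩ := ih2 (by omega) h1 hD hDl (by omega) hN hu2
    refine ⟨⟨t1 ++ go limit (n + N) (d + D) N D, by rw [hL]; simp⟩, ?_, ?_⟩
    · rw [hR, List.append_assoc, List.cons_append, List.isChain_split]
      refine ⟨hC1, ?_⟩
      have h' := hC2
      rw [hR] at h'
      exact h'
    · intro p hp
      rcases List.mem_append.mp hp with h | h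
      · obtain ⟨q1, q2, q3, q4⟩ := hB1 p h
        refine ⟨q1, q2, q3, ?_⟩
        have hx : (n + N) * D = (d + D) * N - 1 := by linear_combination -hu
        have h5 : p.1 * (d + D) * D < p.2 * (n + N) * D :=
          mul_lt_mul_of_pos_right q4 (by omega)
        have h7 : p.2 * ((n + N) * D) = p.2 * ((d + D) * N - 1) := by rw [hx]
        have h6 : p.1 * D * (d + D) < p.2 * N * (d + D) := by nlinarith [h5, h7, q1]
        exact lt_of_mul_lt_mul_right h6 (by omega)
      · exact hB2 p h

theorem go_length (limit : Int) : ∀ n d N D : Int,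
    (go limit n d N D).length ≤ 3 ^ (limit + 1 - (d + D)).toNat := by
  intro n d N D
  fun_induction go limit n d N D with
  | case1 n d N D h1 h2 ih1 ih2 =>
    rw [List.length_append]
    have p1 : 3 ^ (limit + 1 - (d + (d + D))).toNat ≤ 3 ^ ((limit + 1 - (d + D)).toNat - 1) :=
      Nat.pow_le_pow_right (by norm_num) (by omega)
    have p2 : 3 ^ (limit + 1 - ((d + D) + D)).toNat ≤ 3 ^ ((limit + 1 - (d + D)).toNat - 1) :=
      Nat.pow_le_pow_right (by norm_num) (by omega)
    have e : 3 ^ (limit + 1 - (d + D)).toNat = 3 * 3 ^ ((limit + 1 - (d + D)).toNat - 1) := by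
      conv_lhs => rw [show (limit + 1 - (d + D)).toNat = ((limit + 1 - (d + D)).toNat - 1) + 1 by omega]
      rw [pow_succ]; ring
    omega
  | case2 n d N D h1 h2 => simp
  | case3 n d N D h1 =>
    simpa using Nat.one_le_pow _ _ (by norm_num)

theorem step_uniq (limit a b c d e f : Int) (hd : 1 ≤ d) (hfl : f ≤ limit)
    (h1 : b * c - a * d = 1) (h3 : d * e - c * f = 1) (h4 : limit < d + f) :
    PySem.Int.floordiv (limit + b) d * c - a = e ∧
    PySem.Int.floordiv (limit + b) d * d - b = f := by
  have hco : IsCoprime (d : Int) c := ⟨-a, b, by linear_combination h1⟩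
  have hm : c * (f + b) = d * (e + a) := by linear_combination h1 - h3
  have hdvd : d ∣ (f + b) := hco.dvd_of_dvd_mul_left ⟨e + a, hm⟩
  obtain ⟨t, ht⟩ := hdvd
  have h5 : d * (c * t - e - a) = 0 := by linear_combination hm - c * ht
  have he : c * t - e - a = 0 := by
    rcases mul_eq_zero.mp h5 with h | h
    · omega
    · exact h
  have htd : t * d = f + b := by linear_combination -ht
  have hk : PySem.Int.floordiv (limit + b) d = t := by
    rw [PySem.Int.floordiv_eq_iff_of_pos (by omega)]
    constructor
    · nlinarith
    · nlinarith
  rw [hk]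
  constructor
  · linarith
  · linarith

theorem sim (limit : Int) : ∀ (l : List (Int × Int)) (fuel : Nat) (a b c d : Int),
    List.IsChain (pvRel limit) ((a, b) :: (c, d) :: l ++ [(1, 1)]) →
    (∀ p ∈ (c, d) :: l, 1 ≤ p.2 ∧ p.2 ≤ limit ∧ 0 ≤ p.1 ∧ p.1 < p.2) →
    l.length + 2 ≤ fuel →
    fareyLoop limit fuel a b c d = (c, d) :: l := by
  intro l
  induction l with
  | nil =>
    intro fuel a b c d hch hb hf
    rw [show ([(a, b), (c, d)] ++ [(1, 1)] : List (Int × Int)) = [(a, b), (c, d), (1, 1)] from rfl] at hch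
    obtain ⟨r1, hch2⟩ := List.isChain_cons_cons.mp hch
    obtain ⟨r2, -⟩ := List.isChain_cons_cons.mp hch2
    obtain ⟨hcd1, hcd2, hcd3, hcd4⟩ := hb (c, d) List.mem_cons_self
    simp only at hcd1 hcd2 hcd3 hcd4
    have hs := step_uniq limit a b c d 1 1 hcd1 (by omega) r1.1 r2.1 r2.2
    have hne : ¬(c = 1 ∧ d = 1) := by rintro ⟨rfl, rfl⟩; omega
    rcases fuel with _ | fuel
    · omega
    · simp only [fareyLoop]
      rw [if_neg hne, hs.1, hs.2]
      rcases fuel with _ | fuel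
      · omega
      · simp [fareyLoop]
  | cons q l ih =>
    obtain ⟨e, f⟩ := q
    intro fuel a b c d hch hb hf
    simp only [List.cons_append] at hch
    obtain ⟨r1, hch2⟩ := List.isChain_cons_cons.mp hch
    obtain ⟨r2, -⟩ := List.isChain_cons_cons.mp hch2
    obtain ⟨hcd1, hcd2, hcd3, hcd4⟩ := hb (c, d) List.mem_cons_self
    simp only at hcd1 hcd2 hcd3 hcd4
    obtain ⟨hef1, hef2, hef3, hef4⟩ :=
      hb (e, f) (List.mem_cons_of_mem _ List.mem_cons_self)
    simp only at hef1 hef2 hef3 hef4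
    have hs := step_uniq limit a b c d e f hcd1 hef2 r1.1 r2.1 r2.2
    have hne : ¬(c = 1 ∧ d = 1) := by rintro ⟨rfl, rfl⟩; omega
    rcases fuel with _ | fuel
    · simp at hf
    · simp only [fareyLoop]
      rw [if_neg hne, hs.1, hs.2]
      congr 1
      refine ih fuel c d e f ?_ ?_ ?_
      · simpa only [List.cons_append] using hch2
      · intro p hp
        exact hb p (List.mem_cons_of_mem _ hp)
      · simp at hf ⊢
        omega

-- ===== VERDICT (by name: the statement is the Claim_ definition above) =====
theorem coprimes_gen_spec : Claim_equal_coprimes_gen := by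
  unfold Claim_equal_coprimes_gen Spec_coprimes_gen
  intro limit _
  unfold coprimes_gen coprimes_gen_alt
  have hfuel : 2 * (pvW limit 1 1 + (([] : List (Int × Int × Int × Int)).map
      (fun f => pvW limit f.2.1 f.2.2.2)).sum) + ([] : List (Int × Int × Int × Int)).length
      < 2 * 3 ^ (limit + 1).toNat + 1 := by
    have h1 : pvW limit 1 1 = 3 ^ (limit + 1 - (1 + 1)).toNat - 1 := rfl
    have h2 : 3 ^ (limit + 1 - (1 + 1)).toNat ≤ 3 ^ (limit + 1).toNat :=
      Nat.pow_le_pow_right (by norm_num) (by omega)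
    simp only [List.map_nil, List.sum_nil, List.length_nil]
    omega
  have hmain := loopA_go limit (2 * 3 ^ (limit + 1).toNat + 1) 0 1 1 1 []
    (by norm_num) (by norm_num) (by simp) hfuel
  simp only [List.map_nil, List.flatten_nil, List.append_nil] at hmain
  rw [hmain]
  by_cases hl : limit < 2
  · rw [go, dif_neg (by omega : ¬(1 : Int) + 1 ≤ limit), if_pos hl]
  · replace hl : 2 ≤ limit := by omega
    rw [if_neg (by omega)]
    obtain ⟨⟨t, hgo⟩, hchain, hbounds⟩ :=
      go_spec limit 0 1 1 1 (by norm_num) (by omega) (by norm_num) (by omega)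
        le_rfl (by norm_num) (by norm_num)
    rw [hgo]
    rcases t with _ | ⟨⟨c, d⟩, t'⟩
    · exfalso
      rw [hgo] at hchain
      have hpair : List.IsChain (pvRel limit) [((0 : Int), (1 : Int)), (1, 1)] := hchain
      have := (List.isChain_pair.mp hpair).2
      simp only at this
      omega
    · rw [hgo] at hchain hbounds
      have hch' : List.IsChain (pvRel limit) ((0, 1) :: (c, d) :: t' ++ [(1, 1)]) := by
        simpa [List.cons_append] using hchain
      obtain ⟨r1, -⟩ := List.isChain_cons_cons.mp hch'
      have hcd := hbounds (c, d) (by simp)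
      have hr1 := r1.1
      have hr2 := r1.2
      simp only at hr1 hr2
      have hc : c = 1 := by omega
      have hd : d = limit := by
        have h2 := hcd.2.1
        simp only at h2
        omega
      congr 1
      rw [hc, hd] at hch' hbounds ⊢
      refine (sim limit t' _ 0 1 1 limit ?_ ?_ ?_).symm
      · exact hch'
      · intro p hp
        obtain ⟨q1, q2, q3, q4⟩ := hbounds p (List.mem_cons_of_mem _ hp)
        exact ⟨q1, q2, q3, by simpa using q4⟩
      · have hlen := go_length limit 0 1 1 1
        rw [hgo] at hlen
        have hmono : 3 ^ (limit + 1 - (1 + 1)).toNat ≤ 3 ^ (limit + 1).toNat :=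
          Nat.pow_le_pow_right (by norm_num) (by omega)
        simp only [List.length_cons] at hlen
        omega
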